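-- pv_equiv track=rewrite | github.com/zathp/Open_Vision | node_editor_window.py | _ordered_keys
-- ===== SOURCE A (Python) =====
-- from typing import Callable, Dict, List, Optional, Set, Tuple
--
-- def _ordered_keys(properties: Dict[str, object]) -> List[str]:
--     preferred_order = [
--         "file_path",
--         "format_type",
--         "frame_index",
--         "cache_image",
--         "base_color_r",
--         "base_color_g",
--         "base_color_b",
--         "base_color_a",
--         "output_color_r",
--         "output_color_g",
--         "output_color_b",
--         "output_color_a",
--         "selection_type",
--         "tolerance",
--         "distance_type",
--         "shift_type",
--         "shift_amount",
--         "output_mask",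
--         "blur_type",
--         "gaussian_radius",
--         "box_kernel",
--         "motion_angle",
--         "motion_distance",
--         "radial_strength",
--         "max_radius",
--         "output_path",
--         "save_format",
--         "quality",
--         "version",
--         "auto_increment_counter",
--         "create_directories",
--         "overwrite",
--     ]
--     index_map = {key: index for index, key in enumerate(preferred_order)}
--     return sorted(properties.keys(), key=lambda key: (index_map.get(key, 999), key.lower()))
-- ===== SOURCE B (Python) =====
-- def _ordered_keys(properties):
--     preferred_order = [
--         "file_path",
--         "format_type",
--         "frame_index",
--         "cache_image",
--         "base_color_r",
--         "base_color_g",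
--         "base_color_b",
--         "base_color_a",
--         "output_color_r",
--         "output_color_g",
--         "output_color_b",
--         "output_color_a",
--         "selection_type",
--         "tolerance",
--         "distance_type",
--         "shift_type",
--         "shift_amount",
--         "output_mask",
--         "blur_type",
--         "gaussian_radius",
--         "box_kernel",
--         "motion_angle",
--         "motion_distance",
--         "radial_strength",
--         "max_radius",
--         "output_path",
--         "save_format",
--         "quality",
--         "version",
--         "auto_increment_counter",
--         "create_directories",
--         "overwrite",
--     ]
--     preferred_set = set(preferred_order)
--     ordered = [k for k in preferred_order if k in properties]
--     rest = sorted((k for k in properties if k not in preferred_set), key=str.lower)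
--     return ordered + rest
-- ===== Notes on version B (the rewrite author's own statement) =====
-- stated objective: simpler
-- what changed: Replaces the single composite-key (preferred-index, lowercase) sort over all keys with two phases: filter the fixed preferred list against the dict to place known keys without sorting, then stably sort only the leftover keys by lowercase and append.
import Mathlib
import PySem

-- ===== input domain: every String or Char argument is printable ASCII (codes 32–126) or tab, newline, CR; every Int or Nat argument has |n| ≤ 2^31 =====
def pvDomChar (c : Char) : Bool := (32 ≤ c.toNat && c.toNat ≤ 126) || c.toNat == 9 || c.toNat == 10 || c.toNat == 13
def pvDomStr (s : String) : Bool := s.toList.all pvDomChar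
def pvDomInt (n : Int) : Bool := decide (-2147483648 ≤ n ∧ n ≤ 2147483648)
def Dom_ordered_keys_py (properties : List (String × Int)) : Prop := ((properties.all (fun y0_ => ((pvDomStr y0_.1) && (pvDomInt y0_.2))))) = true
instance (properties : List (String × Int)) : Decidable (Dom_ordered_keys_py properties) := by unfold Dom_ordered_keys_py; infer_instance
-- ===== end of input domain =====

-- B replaces A's composite-key sort of all keys by: filter the fixed preferred list in order, then stably sort only the leftover keys by lowercase (objective: simpler).


-- ===== PORT A =====
-- the literal preferred_order list of A (B's python repeats the same literal)
def pvPreferredOrder : List String :=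
  ["file_path", "format_type", "frame_index", "cache_image", "base_color_r", "base_color_g", "base_color_b", "base_color_a", "output_color_r", "output_color_g", "output_color_b", "output_color_a", "selection_type", "tolerance", "distance_type", "shift_type", "shift_amount", "output_mask", "blur_type", "gaussian_radius", "box_kernel", "motion_angle", "motion_distance", "radial_strength", "max_radius", "output_path", "save_format", "quality", "version", "auto_increment_counter", "create_directories", "overwrite"]

-- index_map = {key: index for index, key in enumerate(preferred_order)}
def pvIndexMap : PySem.Dict String Int :=
  (PySem.List.enumerate pvPreferredOrder).foldl (fun d p => d.insert p.2 p.1) (PySem.Dict.mk [])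

-- sorted(properties.keys(), key=lambda key: (index_map.get(key, 999), key.lower()))
def ordered_keys_py (properties : List (String × Int)) : List String :=
  let keys := PySem.List.dedup (properties.map Prod.fst)   -- properties.keys(): first occurrence of each key
  PySem.List.sorted2 keys (fun k => pvIndexMap.getD k 999) (fun k => PySem.Str.lower k) false

-- ===== PORT B =====
def ordered_keys_py_alt (properties : List (String × Int)) : List String :=
  let preferred_set : PySem.Set String := PySem.Set.ofList pvPreferredOrder
  let ordered := pvPreferredOrder.filter (fun k => (properties.map Prod.fst).contains k)
  let rest := PySem.List.sorted
      ((PySem.List.dedup (properties.map Prod.fst)).filter (fun k => !(PySem.Set.contains preferred_set k)))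
      (fun k => PySem.Str.lower k) false
  ordered ++ rest

-- ===== PRECONDITION & SPEC =====
def Spec_ordered_keys_py (properties : List (String × Int)) (out : List String) : Prop := out = ordered_keys_py_alt properties
instance (properties : List (String × Int)) (out : List String) : Decidable (Spec_ordered_keys_py properties out) := by unfold Spec_ordered_keys_py; infer_instance

-- ===== CLAIM (what is proved, stated in full; the proofs are below) =====
def Claim_equal_ordered_keys_py : Prop := ∀ (properties : List (String × Int)), Dom_ordered_keys_py properties → Spec_ordered_keys_py properties (ordered_keys_py properties)

-- ===== LEMMAS AND PROOFS =====

-- A's composite sort key, as a named function of the literal dict (proof-side only)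
def pvIdx (k : String) : Int := pvIndexMap.getD k 999

lemma pvInsertBy_all_before {α : Type} (before : α → α → Bool) (x : α) (ps rs : List α)
    (h : ∀ y ∈ rs, before x y = true) :
    PySem.List.insertBy before x (ps ++ rs) = PySem.List.insertBy before x ps ++ rs := by
  induction ps with
  | nil =>
    cases rs with
    | nil => simp [PySem.List.insertBy]
    | cons y t => simp [PySem.List.insertBy, h y (by simp)]
  | cons a ps ih =>
    simp only [List.cons_append, PySem.List.insertBy]
    by_cases hb : before x a <;> simp [hb, ih]

lemma pvInsertBy_none_before {α : Type} (before : α → α → Bool) (x : α) (ps rs : List α)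
    (h : ∀ y ∈ ps, before x y = false) :
    PySem.List.insertBy before x (ps ++ rs) = ps ++ PySem.List.insertBy before x rs := by
  induction ps with
  | nil => simp
  | cons a ps ih =>
    simp only [List.cons_append, PySem.List.insertBy]
    have ha := h a (by simp)
    simp [ha, ih (fun y hy => h y (by simp [hy]))]

lemma pvInsertBy_congr {α : Type} (b₁ b₂ : α → α → Bool) (x : α) (ys : List α)
    (h : ∀ y ∈ ys, b₁ x y = b₂ x y) :
    PySem.List.insertBy b₁ x ys = PySem.List.insertBy b₂ x ys := by
  induction ys with
  | nil => rfl
  | cons y t ih =>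
    simp only [PySem.List.insertBy]
    rw [h y (by simp), ih (fun z hz => h z (by simp [hz]))]

lemma pvFoldl_insertBy_split {α : Type} (before : α → α → Bool) (p : α → Bool)
    (hsep : ∀ a b, p a = true → p b = false → before a b = true ∧ before b a = false)
    (xs : List α) : ∀ ps rs : List α, (∀ x ∈ ps, p x = true) → (∀ x ∈ rs, p x = false) →
    xs.foldl (fun acc x => PySem.List.insertBy before x acc) (ps ++ rs)
      = (xs.filter p).foldl (fun acc x => PySem.List.insertBy before x acc) ps
        ++ (xs.filter (fun x => !p x)).foldl (fun acc x => PySem.List.insertBy before x acc) rs := by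
  induction xs with
  | nil => intro ps rs _ _; simp
  | cons x xs ih =>
    intro ps rs hps hrs
    by_cases hp : p x = true
    · have hbef : ∀ y ∈ rs, before x y = true := fun y hy => (hsep x y hp (hrs y hy)).1
      have hps' : ∀ z ∈ PySem.List.insertBy before x ps, p z = true := by
        intro z hz
        rcases (PySem.List.mem_insertBy before x z ps).1 hz with rfl | hz
        · exact hp
        · exact hps z hz
      simp only [List.foldl_cons, List.filter_cons, hp, if_pos, Bool.not_true, if_neg,
        Bool.false_eq_true, not_false_iff]
      rw [pvInsertBy_all_before before x ps rs hbef]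
      exact ih (PySem.List.insertBy before x ps) rs hps' hrs
    · have hpx : p x = false := by simpa using hp
      have hbef : ∀ y ∈ ps, before x y = false := fun y hy => (hsep y x (hps y hy) hpx).2
      have hrs' : ∀ z ∈ PySem.List.insertBy before x rs, p z = false := by
        intro z hz
        rcases (PySem.List.mem_insertBy before x z rs).1 hz with rfl | hz
        · exact hpx
        · exact hrs z hz
      simp only [List.foldl_cons, List.filter_cons, hpx, Bool.not_false, if_pos,
        Bool.false_eq_true, if_neg, not_false_iff]
      rw [pvInsertBy_none_before before x ps rs hbef]
      exact ih ps (PySem.List.insertBy before x rs) hps hrs'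

lemma pvFoldl_insertBy_congr {α : Type} (b₁ b₂ : α → α → Bool) (S : α → Prop)
    (hag : ∀ a b, S a → S b → b₁ a b = b₂ a b)
    (xs : List α) : ∀ acc : List α, (∀ x ∈ xs, S x) → (∀ x ∈ acc, S x) →
    xs.foldl (fun acc x => PySem.List.insertBy b₁ x acc) acc
      = xs.foldl (fun acc x => PySem.List.insertBy b₂ x acc) acc := by
  induction xs with
  | nil => intro acc _ _; rfl
  | cons x xs ih =>
    intro acc hxs hacc
    have hx : S x := hxs x (by simp)
    have hins : PySem.List.insertBy b₁ x acc = PySem.List.insertBy b₂ x acc :=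
      pvInsertBy_congr b₁ b₂ x acc (fun y hy => hag x y hx (hacc y hy))
    have hacc' : ∀ z ∈ PySem.List.insertBy b₁ x acc, S z := by
      intro z hz
      rcases (PySem.List.mem_insertBy b₁ x z acc).1 hz with rfl | hz
      · exact hx
      · exact hacc z hz
    simp only [List.foldl_cons]
    rw [ih (PySem.List.insertBy b₁ x acc) (fun z hz => hxs z (by simp [hz])) hacc', hins]

set_option maxRecDepth 100000 in
lemma pvIdx_lt {k : String} (h : k ∈ pvPreferredOrder) : pvIdx k < 999 := by
  have hall : ∀ a ∈ pvPreferredOrder, pvIdx a < 999 := by decide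
  exact hall k h

set_option maxRecDepth 100000 in
lemma pvIdx_inj : ∀ a ∈ pvPreferredOrder, ∀ b ∈ pvPreferredOrder, pvIdx a = pvIdx b → a = b := by
  decide

set_option maxRecDepth 100000 in
lemma pvPairwiseP : pvPreferredOrder.Pairwise (fun a b => pvIdx a < pvIdx b) := by decide

set_option maxRecDepth 100000 in
lemma pvNodupP : pvPreferredOrder.Nodup := by decide


set_option maxRecDepth 100000 in
lemma pvItemsFst : pvIndexMap.items.map Prod.fst = pvPreferredOrder := by decide

lemma pvIdx_not {k : String} (h : k ∉ pvPreferredOrder) : pvIdx k = 999 := by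
  have hfind : List.find? (fun p => p.1 == k) pvIndexMap.items = none := by
    rw [List.find?_eq_none]
    intro x hx
    simp only [beq_iff_eq]
    intro hxk
    exact h (hxk ▸ (pvItemsFst ▸ List.mem_map_of_mem hx))
  simp [pvIdx, PySem.Dict.getD, PySem.Dict.get?, hfind]

def pvB2 (a b : String) : Bool :=
  decide (pvIdx a < pvIdx b) || (!decide (pvIdx b < pvIdx a) && decide (PySem.Str.lower a < PySem.Str.lower b))

def pvPred (k : String) : Bool := pvPreferredOrder.contains k

set_option maxRecDepth 100000 in
lemma pvSetEq : (PySem.Set.ofList pvPreferredOrder : List String) = pvPreferredOrder := by decide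

-- ===== VERDICT (by name: the statement is the Claim_ definition above) =====
theorem ordered_keys_py_spec : Claim_equal_ordered_keys_py := by
  intro properties _
  unfold Spec_ordered_keys_py ordered_keys_py ordered_keys_py_alt
  simp only [PySem.List.sorted2, Bool.false_eq_true, if_false]
  show List.foldl (fun acc x => PySem.List.insertBy pvB2 x acc) []
        (PySem.List.dedup (List.map Prod.fst properties)) = _
  set kraw := List.map Prod.fst properties with hkraw
  set keys := PySem.List.dedup kraw with hkeys
  have hsep : ∀ a b, pvPred a = true → pvPred b = false → pvB2 a b = true ∧ pvB2 b a = false := by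
    intro a b ha hb
    have ha' : a ∈ pvPreferredOrder := by simpa [pvPred] using ha
    have hb' : b ∉ pvPreferredOrder := by simpa [pvPred] using hb
    have hia := pvIdx_lt ha'
    have hib := pvIdx_not hb'
    constructor
    · simp [pvB2, hib, hia]
    · simp [pvB2, hib, hia, asymm hia]
  have hsplit := pvFoldl_insertBy_split pvB2 pvPred hsep keys [] []
      (by intro x hx; simp at hx) (by intro x hx; simp at hx)
  simp only [List.append_nil] at hsplit
  rw [hsplit]
  have hag1 : ∀ a b, a ∈ pvPreferredOrder → b ∈ pvPreferredOrder →
      pvB2 a b = decide (pvIdx a < pvIdx b) := by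
    intro a b ha hb
    rcases lt_trichotomy (pvIdx a) (pvIdx b) with h | h | h
    · simp [pvB2, h, asymm h]
    · have hab : a = b := pvIdx_inj a ha b hb h
      subst hab
      simp [pvB2]
    · simp [pvB2, h, asymm h]
  have hag2 : ∀ a b, a ∉ pvPreferredOrder → b ∉ pvPreferredOrder →
      pvB2 a b = decide (PySem.Str.lower a < PySem.Str.lower b) := by
    intro a b ha hb
    simp [pvB2, pvIdx_not ha, pvIdx_not hb]
  have h1 : (keys.filter pvPred).foldl (fun acc x => PySem.List.insertBy pvB2 x acc) []
      = List.filter (fun k => kraw.contains k) pvPreferredOrder := by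
    have hmem : ∀ x ∈ keys.filter pvPred, x ∈ pvPreferredOrder := by
      intro x hx
      simpa [pvPred] using (List.mem_filter.1 hx).2
    rw [pvFoldl_insertBy_congr pvB2 (fun a b => decide (pvIdx a < pvIdx b))
        (fun a => a ∈ pvPreferredOrder) hag1 _ [] hmem (by intro x hx; simp at hx)]
    rw [← PySem.List.sorted_eq_foldl_insertBy (keys.filter pvPred) pvIdx]
    apply PySem.List.sorted_eq_of_perm_of_pairwise_lt
    · rw [List.perm_ext_iff_of_nodup (List.Nodup.filter _ pvNodupP)
        (List.Nodup.filter _ (PySem.List.nodup_dedup kraw))]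
      intro a
      simp [pvPred, and_comm]
    · exact List.Pairwise.filter _ pvPairwiseP
  have h2 : (keys.filter (fun x => !pvPred x)).foldl (fun acc x => PySem.List.insertBy pvB2 x acc) []
      = PySem.List.sorted (keys.filter (fun k => !(PySem.Set.ofList pvPreferredOrder).contains k))
          (fun k => PySem.Str.lower k) := by
    have hmem : ∀ x ∈ keys.filter (fun x => !pvPred x), x ∉ pvPreferredOrder := by
      intro x hx
      have := (List.mem_filter.1 hx).2
      simpa [pvPred] using this
    rw [pvFoldl_insertBy_congr pvB2 (fun a b => decide (PySem.Str.lower a < PySem.Str.lower b))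
        (fun a => a ∉ pvPreferredOrder) hag2 _ [] hmem (by intro x hx; simp at hx)]
    rw [← PySem.List.sorted_eq_foldl_insertBy (keys.filter (fun x => !pvPred x))
        (fun k => PySem.Str.lower k)]
    have hf : keys.filter (fun x => !pvPred x)
        = keys.filter (fun k => !(PySem.Set.ofList pvPreferredOrder).contains k) :=
      List.filter_congr (fun k _ => by simp [pvPred, PySem.Set.contains, pvSetEq])
    rw [hf]
  rw [h1, h2]
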